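-- pv_equiv track=rewrite | github.com/qdCassie-Li/DMCA | src/model.py | calWindowNumsInThread
-- ===== SOURCE A (Python) =====
-- def calWindowNumsInThread(spans):
--     thread_windows_nums = []
--     for span in spans:
--         lens = 0
--         nums = []
--         for i,sp in enumerate(span):
--             # pdb.set_trace()
--             if sp == span[0] and i>0:
--                 nums.append(lens)
--                 lens = 1
--             else:
--                 lens += 1
--             if i == len(span)-1:
--                 nums.append(lens)
--         thread_windows_nums.append(nums)
--     return thread_windows_nums
-- ===== SOURCE B (Python) =====
-- def calWindowNumsInThread(spans):
--     thread_windows_nums = []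
--     for span in spans:
--         if not span:
--             thread_windows_nums.append([])
--             continue
--         bs = [i for i, sp in enumerate(span) if sp == span[0]]
--         nums = [bs[k + 1] - bs[k] for k in range(len(bs) - 1)] + [len(span) - bs[-1]]
--         thread_windows_nums.append(nums)
--     return thread_windows_nums
-- ===== Notes on version B (the rewrite author's own statement) =====
-- stated objective: alternative
-- what changed: Instead of A's stateful run-length counter threaded through an enumerate loop with an end-of-list flush, B first collects the boundary indices (positions equal to span[0]) per span and derives the window counts arithmetically as consecutive-boundary differences plus a final len(span)-last_boundary term.
import Mathlib
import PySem

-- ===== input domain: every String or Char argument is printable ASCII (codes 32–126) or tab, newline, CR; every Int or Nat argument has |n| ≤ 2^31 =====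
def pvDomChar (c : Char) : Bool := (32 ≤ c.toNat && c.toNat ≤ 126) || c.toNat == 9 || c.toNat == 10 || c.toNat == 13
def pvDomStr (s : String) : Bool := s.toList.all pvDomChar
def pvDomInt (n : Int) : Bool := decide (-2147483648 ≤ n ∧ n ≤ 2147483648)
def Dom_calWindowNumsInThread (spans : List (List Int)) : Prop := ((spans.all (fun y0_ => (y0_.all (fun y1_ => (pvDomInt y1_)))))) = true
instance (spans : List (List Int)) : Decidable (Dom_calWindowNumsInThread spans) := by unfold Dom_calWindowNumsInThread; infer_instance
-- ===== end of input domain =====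

-- B replaces A's stateful run-length loop by boundary indices + consecutive differences (alternative decomposition, same cost).
-- ===== PORT A =====
-- step of A's inner loop over enumerate(span); h = span[0], n = len(span)
def stepA (h : Int) (n : Int) (st : Int × List Int) (p : Int × Int) : Int × List Int :=
  let (lens, nums) := st
  let (i, sp) := p
  let (lens, nums) := if sp = h ∧ 0 < i then (1, nums ++ [lens]) else (lens + 1, nums)
  let nums := if i = n - 1 then nums ++ [lens] else nums
  (lens, nums)

-- A's inner loop; span[0] is only read inside the loop (span nonempty there), so headD 0 is exact
def innerA (span : List Int) : List Int :=
  ((PySem.List.enumerate span 0).foldl (stepA (span.headD 0) span.length) (0, [])).2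

def calWindowNumsInThread (spans : List (List Int)) : List (List Int) :=
  spans.foldl (fun acc span => acc ++ [innerA span]) []

-- ===== PORT B =====
def innerB (span : List Int) : List Int :=
  if span = [] then []
  else
    let bs : List Int := ((PySem.List.enumerate span 0).filter (fun p => p.2 = span.headD 0)).map (fun p => p.1)
    (List.range (bs.length - 1)).map (fun k => bs.getD (k + 1) 0 - bs.getD k 0)
      ++ [(span.length : Int) - bs.getLastD 0]

def calWindowNumsInThread_alt (spans : List (List Int)) : List (List Int) :=
  spans.foldl (fun acc span => acc ++ [innerB span]) []

-- ===== PRECONDITION & SPEC =====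
def Spec_calWindowNumsInThread (spans : List (List Int)) (out : List (List Int)) : Prop := out = calWindowNumsInThread_alt spans
instance (spans : List (List Int)) (out : List (List Int)) : Decidable (Spec_calWindowNumsInThread spans out) := by unfold Spec_calWindowNumsInThread; infer_instance

-- ===== CLAIM (what is proved, stated in full; the proofs are below) =====
def Claim_equal_calWindowNumsInThread : Prop := ∀ (spans : List (List Int)), Dom_calWindowNumsInThread spans → Spec_calWindowNumsInThread spans (calWindowNumsInThread spans)

-- ===== LEMMAS AND PROOFS =====
-- reference: run lengths of the tail t relative to head h, with lens elements already in the current run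
def segs (h : Int) (t : List Int) (lens : Int) : List Int :=
  match t with
  | [] => [lens]
  | x :: r => if x = h then lens :: segs h r 1 else segs h r (lens + 1)

-- consecutive differences
def diffs : List Int → List Int
  | a :: b :: l => (b - a) :: diffs (b :: l)
  | _ => []

theorem rangeDiffs_eq_diffs (bs : List Int) :
    (List.range (bs.length - 1)).map (fun k => bs.getD (k + 1) 0 - bs.getD k 0) = diffs bs := by
  match bs with
  | [] => simp [diffs]
  | [a] => simp [diffs]
  | a :: b :: l =>
    have ih := rangeDiffs_eq_diffs (b :: l)
    simp only [List.length_cons, Nat.add_sub_cancel] at ih ⊢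
    rw [List.range_succ_eq_map, List.map_cons, List.map_map]
    conv_rhs => rw [show diffs (a :: b :: l) = (b - a) :: diffs (b :: l) from rfl]
    refine congrArg₂ List.cons (by simp) ?_
    rw [← ih]
    exact List.map_congr_left (fun k _ => by simp [Function.comp])

-- boundary indices of t starting at index p
def bsOf (h : Int) (t : List Int) (p : Int) : List Int :=
  ((PySem.List.enumerate t p).filter (fun q => q.2 = h)).map (fun q => q.1)

theorem bsOf_cons (h x : Int) (r : List Int) (p : Int) :
    bsOf h (x :: r) p = if x = h then p :: bsOf h r (p + 1) else bsOf h r (p + 1) := by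
  simp [bsOf, PySem.List.enumerate_cons, List.filter_cons]
  split_ifs with hx <;> simp_all

theorem numsFrom_spec (t : List Int) (h : Int) : ∀ (c p lens : Int), p = c + lens →
    diffs (c :: bsOf h t p) ++ [p + t.length - (c :: bsOf h t p).getLastD 0]
      = segs h t lens := by
  induction t with
  | nil =>
    intro c p lens hp
    simp only [bsOf, PySem.List.enumerate_nil, List.filter_nil, List.map_nil, diffs, segs,
      List.length_nil, List.nil_append, Nat.cast_zero]
    have h1 : ([c] : List Int).getLastD 0 = c := rfl
    rw [h1]
    congr 1
    omega
  | cons x r ih =>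
    intro c p lens hp
    rw [bsOf_cons]
    by_cases hx : x = h
    · simp only [if_pos hx, segs]
      have hI := ih p (p + 1) 1 (by ring)
      rw [show diffs (c :: p :: bsOf h r (p + 1)) = (p - c) :: diffs (p :: bsOf h r (p + 1)) from rfl]
      simp only [List.getLastD_eq_getLast?, List.getLast?_cons_cons] at hI ⊢
      rw [show p + ((x :: r).length : Int) = (p + 1) + (r.length : Int) by simp only [List.length_cons]; push_cast; ring]
      rw [show p - c = lens by omega]
      simp only [List.cons_append]
      rw [hI]
    · simp only [if_neg hx, segs]
      have hI := ih c (p + 1) (lens + 1) (by omega)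
      rw [show p + ((x :: r).length : Int) = (p + 1) + (r.length : Int) by simp only [List.length_cons]; push_cast; ring]
      exact hI

theorem innerB_cons (h : Int) (t : List Int) :
    innerB (h :: t) = segs h t 1 := by
  have hbs : ((PySem.List.enumerate (h :: t) 0).filter (fun p => p.2 = (h :: t).headD 0)).map
      (fun p : Int × Int => p.1) = (0 : Int) :: bsOf h t 1 := by
    simp [PySem.List.enumerate_cons, bsOf]
  simp only [innerB, if_neg (List.cons_ne_nil h t)]
  rw [hbs, rangeDiffs_eq_diffs]
  have := numsFrom_spec t h 0 1 1 (by ring)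
  simpa [add_comm] using this

theorem stepA_loop (t : List Int) (h : Int) : ∀ (p lens : Int) (nums : List Int) (n : Int),
    t ≠ [] → 0 < p → n = p + t.length →
    ((PySem.List.enumerate t p).foldl (stepA h n) (lens, nums)).2 = nums ++ segs h t lens := by
  induction t with
  | nil => intro _ _ _ _ ht _ _; exact absurd rfl ht
  | cons x r ih =>
    intro p lens nums n _ hp hn
    simp only [List.length_cons] at hn
    push_cast at hn
    rw [PySem.List.enumerate_cons, List.foldl_cons]
    by_cases hr : r = []
    · subst hr
      norm_num at hn
      have hlast : p = n - 1 := by omega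
      by_cases hx : x = h
      · simp [stepA, hx, hlast, show (1 : Int) < n by omega, PySem.List.enumerate_nil, segs]
      · simp [stepA, hx, hlast, PySem.List.enumerate_nil, segs]
    · have hrl : (1 : Int) ≤ (r.length : Int) := by
        exact_mod_cast Nat.one_le_iff_ne_zero.mpr (by simpa using hr)
      have hlast : ¬ (p = n - 1) := by omega
      by_cases hx : x = h
      · have hst : stepA h n (lens, nums) (p, x) = (1, nums ++ [lens]) := by
          simp [stepA, hx, hp, hlast]
        rw [hst, ih (p + 1) 1 (nums ++ [lens]) n hr (by omega) (by omega)]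
        simp [segs, hx]
      · have hst : stepA h n (lens, nums) (p, x) = (lens + 1, nums) := by
          simp [stepA, hx, hlast]
        rw [hst, ih (p + 1) (lens + 1) nums n hr (by omega) (by omega)]
        simp [segs, hx]

theorem innerA_eq_innerB (span : List Int) : innerA span = innerB span := by
  cases span with
  | nil => simp [innerA, innerB, PySem.List.enumerate_nil]
  | cons h t =>
    rw [innerB_cons]
    simp only [innerA, PySem.List.enumerate_cons, List.foldl_cons, List.headD_cons]
    cases t with
    | nil => simp [stepA, PySem.List.enumerate_nil, segs]
    | cons y r =>
      have h0 : stepA h ((h :: y :: r).length : Int) (0, []) (0, h) = (1, []) := by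
        simp [stepA]
        omega
      rw [h0, show (0 : Int) + 1 = 1 from rfl]
      rw [stepA_loop (y :: r) h 1 1 [] ((h :: y :: r).length : Int) (List.cons_ne_nil y r)
        (by norm_num) (by simp only [List.length_cons]; push_cast; ring)]
      simp

-- ===== VERDICT (by name: the statement is the Claim_ definition above) =====
theorem calWindowNumsInThread_spec : Claim_equal_calWindowNumsInThread := by
  intro spans _
  unfold Spec_calWindowNumsInThread calWindowNumsInThread calWindowNumsInThread_alt
  rw [PySem.List.foldl_append_singleton_eq_map, PySem.List.foldl_append_singleton_eq_map]
  simp only [List.nil_append]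
  exact List.map_congr_left (fun span _ => innerA_eq_innerB span)
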